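-- pv_equiv track=rewrite | github.com/gniziemazity/LEO-js | scripts/utils/anonymize.py | match_folder_to_student
-- ===== SOURCE A (Python) =====
-- def match_folder_to_student(folder_name, students):
--     if folder_name in students:
--         return students[folder_name]
--
--     folder_lower = folder_name.lower()
--     for name, data in students.items():
--         if name.lower() == folder_lower:
--             return data
--
--     for name, data in students.items():
--         name_lower = name.lower()
--         if folder_lower in name_lower or name_lower in folder_lower:
--             return data
--
--     folder_parts = set(folder_lower.split())
--     for name, data in students.items():
--         name_parts = set(name.lower().split())
--         overlap = folder_parts & name_parts
--         if len(overlap) >= max(1, min(len(folder_parts), len(name_parts)) - 1):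
--             if len(overlap) >= 1 and len(folder_parts) <= 4:
--                 return data
--
--     return None
-- ===== SOURCE B (Python) =====
-- def match_folder_to_student(folder_name, students):
--     folder_lower = folder_name.lower()
--     folder_parts = set(folder_lower.split())
--
--     def _priority(name):
--         if name == folder_name:
--             return 0
--         name_lower = name.lower()
--         if name_lower == folder_lower:
--             return 1
--         if folder_lower in name_lower or name_lower in folder_lower:
--             return 2
--         name_parts = set(name_lower.split())
--         overlap = folder_parts & name_parts
--         if (len(overlap) >= max(1, min(len(folder_parts), len(name_parts)) - 1)
--                 and len(overlap) >= 1 and len(folder_parts) <= 4):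
--             return 3
--         return 4
--
--     best, best_prio = None, 4
--     for name, data in students.items():
--         p = _priority(name)
--         if p < best_prio:
--             best, best_prio = data, p
--             if p == 0:
--                 return best
--     return best
-- ===== Notes on version B (the rewrite author's own statement) =====
-- stated objective: alternative
-- what changed: Replaces A's four sequential scans over the students with a single pass that assigns each student a match priority (0 exact, 1 case-insensitive, 2 substring, 3 word-overlap) and keeps the first student with the lowest priority, short-circuiting on an exact match; not faster in practice (per-element Python-level priority calls cost more than A's separate passes).
import Mathlib
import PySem

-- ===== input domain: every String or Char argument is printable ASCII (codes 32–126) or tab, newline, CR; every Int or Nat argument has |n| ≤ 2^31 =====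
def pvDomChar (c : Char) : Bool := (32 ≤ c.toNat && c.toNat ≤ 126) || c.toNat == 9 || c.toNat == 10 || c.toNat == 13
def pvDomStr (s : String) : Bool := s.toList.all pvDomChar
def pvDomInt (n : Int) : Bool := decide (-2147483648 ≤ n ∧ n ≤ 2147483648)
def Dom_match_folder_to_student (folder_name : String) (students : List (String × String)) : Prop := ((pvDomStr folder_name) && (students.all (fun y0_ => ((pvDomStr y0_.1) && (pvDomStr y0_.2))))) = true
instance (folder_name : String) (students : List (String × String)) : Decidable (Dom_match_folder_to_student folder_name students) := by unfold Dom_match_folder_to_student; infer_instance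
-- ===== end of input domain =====

-- B replaces A's four sequential scans by one pass that keeps the first student of the
-- lowest matching priority (alternative decomposition, same exact results).

-- ===== PORT A =====
-- first (name, data) pair whose name satisfies the predicate (a 'for … return' loop / dict lookup)
def pvScan (c : String → Bool) : List (String × String) → Option String
  | [] => none
  | (n, d) :: t => if c n then some d else pvScan c t

-- 'name == folder_name' (exact dict-key hit)
def pvCond0 (f n : String) : Bool := decide (n = f)
-- 'name.lower() == folder_lower'
def pvCond1 (f n : String) : Bool := decide (PySem.Str.lower n = PySem.Str.lower f)
-- 'folder_lower in name_lower or name_lower in folder_lower'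
def pvCond2 (f n : String) : Bool :=
  PySem.Str.isIn (PySem.Str.lower f) (PySem.Str.lower n) ||
  PySem.Str.isIn (PySem.Str.lower n) (PySem.Str.lower f)
-- the word-overlap test of A's fourth loop
def pvCond3 (f n : String) : Bool :=
  let fp : PySem.Set String := PySem.Set.ofList (PySem.Str.split₀ (PySem.Str.lower f))
  let np : PySem.Set String := PySem.Set.ofList (PySem.Str.split₀ (PySem.Str.lower n))
  let ov := PySem.Set.inter fp np
  decide (max 1 (min fp.length np.length - 1) ≤ ov.length) &&
  (decide (1 ≤ ov.length) && decide (fp.length ≤ 4))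

def match_folder_to_student (folder_name : String) (students : List (String × String)) : Option String :=
  match pvScan (pvCond0 folder_name) students with
  | some d => some d
  | none =>
    match pvScan (pvCond1 folder_name) students with
    | some d => some d
    | none =>
      match pvScan (pvCond2 folder_name) students with
      | some d => some d
      | none => pvScan (pvCond3 folder_name) students

-- ===== PORT B =====
-- Source B's _priority(name)
def pvPrio (f n : String) : Nat :=
  if pvCond0 f n then 0
  else if pvCond1 f n then 1
  else if pvCond2 f n then 2
  else if pvCond3 f n then 3
  else 4

-- Source B's loop: running best (data, priority), update on strictly lower priority, stop at 0
def pvLoopB (f : String) : List (String × String) → Nat → Option String → Option String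
  | [], _, best => best
  | (n, d) :: t, bp, best =>
    let p := pvPrio f n
    if p < bp then (if p = 0 then some d else pvLoopB f t p (some d))
    else pvLoopB f t bp best

def match_folder_to_student_alt (folder_name : String) (students : List (String × String)) : Option String :=
  pvLoopB folder_name students 4 none

-- ===== PRECONDITION & SPEC =====
def Spec_match_folder_to_student (folder_name : String) (students : List (String × String)) (out : Option String) : Prop := out = match_folder_to_student_alt folder_name students
instance (folder_name : String) (students : List (String × String)) (out : Option String) : Decidable (Spec_match_folder_to_student folder_name students out) := by unfold Spec_match_folder_to_student; infer_instance

-- ===== CLAIM (what is proved, stated in full; the proofs are below) =====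
def Claim_equal_match_folder_to_student : Prop := ∀ (folder_name : String) (students : List (String × String)), Dom_match_folder_to_student folder_name students → Spec_match_folder_to_student folder_name students (match_folder_to_student folder_name students)

-- ===== LEMMAS AND PROOFS =====

-- minimum priority in the list (4 if empty)
def pvMin (f : String) : List (String × String) → Nat
  | [] => 4
  | (n, _) :: t => min (pvPrio f n) (pvMin f t)

theorem pvScan_congr_mem (c c' : String → Bool) (l : List (String × String))
    (h : ∀ p ∈ l, c p.1 = c' p.1) : pvScan c l = pvScan c' l := by
  induction l with
  | nil => rfl
  | cons hd t ih =>
    obtain ⟨n, d⟩ := hd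
    have h0 := h (n, d) (by simp)
    simp only [pvScan, h0]
    rw [ih (fun p hp => h p (by simp [hp]))]

theorem pvScan_eq_none_iff (c : String → Bool) (l : List (String × String)) :
    pvScan c l = none ↔ ∀ p ∈ l, c p.1 = false := by
  induction l with
  | nil => simp [pvScan]
  | cons hd t ih =>
    obtain ⟨n, d⟩ := hd
    simp only [pvScan]
    by_cases h : c n <;> simp [h, ih]

theorem pvMin_le (f : String) (l : List (String × String)) (p : String × String)
    (hp : p ∈ l) : pvMin f l ≤ pvPrio f p.1 := by
  induction l with
  | nil => cases hp
  | cons hd t ih =>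
    obtain ⟨n, d⟩ := hd
    rcases List.mem_cons.1 hp with h | h
    · subst h; simp [pvMin]
    · simp only [pvMin]
      exact le_trans (min_le_right _ _) (ih h)

theorem pvMin_mem (f : String) (l : List (String × String)) (h : pvMin f l < 4) :
    ∃ p ∈ l, pvPrio f p.1 = pvMin f l := by
  induction l with
  | nil => simp [pvMin] at h
  | cons hd t ih =>
    obtain ⟨n, d⟩ := hd
    simp only [pvMin] at h ⊢
    rcases le_total (pvPrio f n) (pvMin f t) with hle | hle
    · exact ⟨(n, d), by simp, by simp; omega⟩
    · have ht : pvMin f t < 4 := by omega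
      obtain ⟨p, hp, he⟩ := ih ht
      exact ⟨p, by simp [hp], by omega⟩

theorem pvPrio_le (f n : String) : pvPrio f n ≤ 4 := by
  unfold pvPrio; split_ifs <;> omega

-- priority characterisations
theorem pvPrio_eq_zero_iff (f n : String) : pvPrio f n = 0 ↔ pvCond0 f n = true := by
  unfold pvPrio; split_ifs with h0 h1 h2 h3 <;> simp [h0]

theorem pvCond01 (f n : String) (h : pvCond0 f n = true) : pvCond1 f n = true := by
  simp only [pvCond0, decide_eq_true_eq] at h
  simp [pvCond1, h]

theorem pvCond12 (f n : String) (h : pvCond1 f n = true) : pvCond2 f n = true := by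
  simp only [pvCond1, decide_eq_true_eq] at h
  simp only [pvCond2, h, Bool.or_eq_true]
  left
  simp only [PySem.Str.isIn]
  simp [PySem.Chars.isIn_iff_infix]

-- the characterisation of B's loop: first student achieving the list's minimal priority,
-- if that minimum beats the running bound, else the accumulator
theorem pvLoopB_eq (f : String) (l : List (String × String)) :
    ∀ (bp : Nat) (best : Option String), bp ≤ 4 →
    pvLoopB f l bp best =
      if pvMin f l < bp then pvScan (fun n => decide (pvPrio f n = pvMin f l)) l else best := by
  induction l with
  | nil =>
    intro bp best hbp
    have : ¬ (4 : Nat) < bp := by omega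
    simp [pvLoopB, pvMin, this]
  | cons hd t ih =>
    intro bp best hbp
    obtain ⟨n, d⟩ := hd
    simp only [pvLoopB, pvMin]
    by_cases hlt : pvPrio f n < bp
    · simp only [hlt, if_true]
      by_cases h0 : pvPrio f n = 0
      · have hm : min (pvPrio f n) (pvMin f t) = 0 := by omega
        simp [h0, hm, pvScan, hlt, show (0:Nat) < bp by omega]
      · simp only [h0, if_false]
        rw [ih (pvPrio f n) (some d) (by have := pvPrio_le f n; omega)]
        rcases lt_or_ge (pvMin f t) (pvPrio f n) with hc | hc
        · have hm : min (pvPrio f n) (pvMin f t) = pvMin f t := by omega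
          have : pvMin f t < bp := by omega
          simp only [hm, this, if_true, hc, if_true, pvScan]
          have hne : (decide (pvPrio f n = pvMin f t)) = false := by simp; omega
          simp [hne]
        · have hm : min (pvPrio f n) (pvMin f t) = pvPrio f n := by omega
          have hnc : ¬ pvMin f t < pvPrio f n := by omega
          simp [hm, hnc, hlt, pvScan]
    · simp only [hlt, if_false]
      rw [ih bp best hbp]
      rcases lt_or_ge (pvMin f t) bp with hc | hc
      · have hm : min (pvPrio f n) (pvMin f t) = pvMin f t := by omega
        simp only [hm, hc, if_true, pvScan]
        have hne : (decide (pvPrio f n = pvMin f t)) = false := by simp; omega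
        simp [hne]
      · have : ¬ min (pvPrio f n) (pvMin f t) < bp := by omega
        simp [this, hc]

-- all members' cond_i are false when the corresponding scan returned none
theorem pvChain_eq (f : String) (l : List (String × String)) :
    match_folder_to_student f l =
      if pvMin f l < 4 then pvScan (fun n => decide (pvPrio f n = pvMin f l)) l else none := by
  unfold match_folder_to_student
  rcases lt_or_ge (pvMin f l) 4 with hm | hm
  · obtain ⟨q, hq, hqe⟩ := pvMin_mem f l hm
    have hle : ∀ p ∈ l, pvMin f l ≤ pvPrio f p.1 := fun p hp => pvMin_le f l p hp
    -- case on the value of the minimum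
    interval_cases h : pvMin f l
    · -- min = 0 : scan cond0 finds q
      have hcongr : pvScan (pvCond0 f) l = pvScan (fun n => decide (pvPrio f n = 0)) l := by
        apply pvScan_congr_mem
        intro p _
        by_cases hc : pvCond0 f p.1 <;> simp [hc, pvPrio_eq_zero_iff]
      have hne : pvScan (pvCond0 f) l ≠ none := by
        rw [Ne, pvScan_eq_none_iff]
        intro hall
        have := hall q hq
        rw [(pvPrio_eq_zero_iff f q.1).1 hqe] at this
        cases this
      rcases ho : pvScan (pvCond0 f) l with _ | d
      · exact absurd ho hne
      · rw [← hcongr, ho]; simp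
    · -- min = 1 : no cond0 anywhere, scan cond1 finds q
      have hno0 : ∀ p ∈ l, pvCond0 f p.1 = false := by
        intro p hp
        by_cases hc : pvCond0 f p.1
        · have := (pvPrio_eq_zero_iff f p.1).2 hc
          have := hle p hp; omega
        · simpa using hc
      have h0 : pvScan (pvCond0 f) l = none := (pvScan_eq_none_iff _ _).2 hno0
      have hcongr : pvScan (pvCond1 f) l = pvScan (fun n => decide (pvPrio f n = 1)) l := by
        apply pvScan_congr_mem
        intro p hp
        have hc0 := hno0 p hp
        by_cases hc : pvCond1 f p.1 <;> simp [pvPrio, hc, hc0] <;> split_ifs <;> omega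
      have hne : pvScan (pvCond1 f) l ≠ none := by
        rw [Ne, pvScan_eq_none_iff]
        intro hall
        have hq1 := hall q hq
        have : pvPrio f q.1 = 1 := hqe
        simp [pvPrio, hq1, hno0 q hq] at this
        split_ifs at this <;> omega
      rcases ho : pvScan (pvCond1 f) l with _ | d
      · exact absurd ho hne
      · rw [h0, ← hcongr, ho]; simp
    · -- min = 2 : no cond0/cond1, scan cond2 finds q
      have hno1 : ∀ p ∈ l, pvCond1 f p.1 = false := by
        intro p hp
        by_cases hc : pvCond1 f p.1
        · have h2 : pvPrio f p.1 ≤ 1 := by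
            unfold pvPrio; split_ifs <;> simp_all
          have := hle p hp; omega
        · simpa using hc
      have hno0 : ∀ p ∈ l, pvCond0 f p.1 = false := by
        intro p hp
        by_cases hc : pvCond0 f p.1
        · have := pvCond01 f p.1 hc
          rw [hno1 p hp] at this; cases this
        · simpa using hc
      have h0 : pvScan (pvCond0 f) l = none := (pvScan_eq_none_iff _ _).2 hno0
      have h1 : pvScan (pvCond1 f) l = none := (pvScan_eq_none_iff _ _).2 hno1
      have hcongr : pvScan (pvCond2 f) l = pvScan (fun n => decide (pvPrio f n = 2)) l := by
        apply pvScan_congr_mem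
        intro p hp
        by_cases hc : pvCond2 f p.1 <;> simp [pvPrio, hc, hno0 p hp, hno1 p hp] <;>
          split_ifs <;> omega
      have hne : pvScan (pvCond2 f) l ≠ none := by
        rw [Ne, pvScan_eq_none_iff]
        intro hall
        have hq2 := hall q hq
        have : pvPrio f q.1 = 2 := hqe
        simp [pvPrio, hq2, hno0 q hq, hno1 q hq] at this
        split_ifs at this <;> omega
      rcases ho : pvScan (pvCond2 f) l with _ | d
      · exact absurd ho hne
      · rw [h0, h1, ← hcongr, ho]; simp
    · -- min = 3 : no cond0/1/2, scan cond3 finds q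
      have hno2 : ∀ p ∈ l, pvCond2 f p.1 = false := by
        intro p hp
        by_cases hc : pvCond2 f p.1
        · have h2 : pvPrio f p.1 ≤ 2 := by
            unfold pvPrio; split_ifs <;> simp_all
          have := hle p hp; omega
        · simpa using hc
      have hno1 : ∀ p ∈ l, pvCond1 f p.1 = false := by
        intro p hp
        by_cases hc : pvCond1 f p.1
        · have := pvCond12 f p.1 hc
          rw [hno2 p hp] at this; cases this
        · simpa using hc
      have hno0 : ∀ p ∈ l, pvCond0 f p.1 = false := by
        intro p hp
        by_cases hc : pvCond0 f p.1
        · have := pvCond01 f p.1 hc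
          rw [hno1 p hp] at this; cases this
        · simpa using hc
      have h0 : pvScan (pvCond0 f) l = none := (pvScan_eq_none_iff _ _).2 hno0
      have h1 : pvScan (pvCond1 f) l = none := (pvScan_eq_none_iff _ _).2 hno1
      have h2 : pvScan (pvCond2 f) l = none := (pvScan_eq_none_iff _ _).2 hno2
      have hcongr : pvScan (pvCond3 f) l = pvScan (fun n => decide (pvPrio f n = 3)) l := by
        apply pvScan_congr_mem
        intro p hp
        by_cases hc : pvCond3 f p.1 <;>
          simp [pvPrio, hc, hno0 p hp, hno1 p hp, hno2 p hp]
      rw [h0, h1, h2, hcongr]; simp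
  · -- min = 4 : every condition false on members, everything scans to none
    have hch : ∀ p ∈ l, pvPrio f p.1 = 4 := by
      intro p hp
      have := pvMin_le f l p hp
      have := pvPrio_le f p.1
      omega
    have hno3 : ∀ p ∈ l, pvCond3 f p.1 = false := by
      intro p hp
      by_cases hc : pvCond3 f p.1
      · have h2 : pvPrio f p.1 ≤ 3 := by
          unfold pvPrio; split_ifs <;> simp_all
        have := hch p hp; omega
      · simpa using hc
    have hno2 : ∀ p ∈ l, pvCond2 f p.1 = false := by
      intro p hp
      by_cases hc : pvCond2 f p.1
      · have h2 : pvPrio f p.1 ≤ 2 := by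
          unfold pvPrio; split_ifs <;> simp_all
        have := hch p hp; omega
      · simpa using hc
    have hno1 : ∀ p ∈ l, pvCond1 f p.1 = false := by
      intro p hp
      by_cases hc : pvCond1 f p.1
      · have := pvCond12 f p.1 hc
        rw [hno2 p hp] at this; cases this
      · simpa using hc
    have hno0 : ∀ p ∈ l, pvCond0 f p.1 = false := by
      intro p hp
      by_cases hc : pvCond0 f p.1
      · have := pvCond01 f p.1 hc
        rw [hno1 p hp] at this; cases this
      · simpa using hc
    rw [(pvScan_eq_none_iff _ _).2 hno0, (pvScan_eq_none_iff _ _).2 hno1,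
        (pvScan_eq_none_iff _ _).2 hno2, (pvScan_eq_none_iff _ _).2 hno3]
    simp [hm]

-- ===== VERDICT (by name: the statement is the Claim_ definition above) =====
theorem match_folder_to_student_spec : Claim_equal_match_folder_to_student := by
  intro f l _
  unfold Spec_match_folder_to_student match_folder_to_student_alt
  rw [pvChain_eq, pvLoopB_eq f l 4 none (by omega)]
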